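-- pv_equiv track=rewrite | github.com/MelyNik/Python_S_L | Seminar/Lesson_5/1_2.py | new_array
-- ===== SOURCE A (Python) =====
-- def new_array(array):
--     new_list_1 = []
--     for i in range(len(array)):
--         new_list_2 = [array[i]]
--         number = array[i]
--         for j in range(i+1, len(array)):
--             if array[j] > number :
--                 new_list_2.append(array[j])
--                 number = array[j]
--         if len(new_list_2) > 1:
--             new_list_1.append(new_list_2)
--     return new_list_1
-- ===== SOURCE B (Python) =====
-- def new_array(array):
--     # One right-to-left pass: the monotonic stack (top at index 0) after
--     # processing position i IS the greedy increasing-record chain starting at i.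
--     out = []
--     stack = []
--     for x in reversed(array):
--         while stack and stack[0] <= x:
--             stack.pop(0)
--         stack.insert(0, x)
--         if len(stack) > 1:
--             out.append(stack[:])
--     out.reverse()
--     return out
-- ===== Notes on version B (the rewrite author's own statement) =====
-- stated objective: alternative
-- what changed: Replaced the per-index rescans of the whole suffix (nested loops) by a single right-to-left pass maintaining a monotonic stack that at each position IS the greedy record chain starting there.
import Mathlib
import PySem

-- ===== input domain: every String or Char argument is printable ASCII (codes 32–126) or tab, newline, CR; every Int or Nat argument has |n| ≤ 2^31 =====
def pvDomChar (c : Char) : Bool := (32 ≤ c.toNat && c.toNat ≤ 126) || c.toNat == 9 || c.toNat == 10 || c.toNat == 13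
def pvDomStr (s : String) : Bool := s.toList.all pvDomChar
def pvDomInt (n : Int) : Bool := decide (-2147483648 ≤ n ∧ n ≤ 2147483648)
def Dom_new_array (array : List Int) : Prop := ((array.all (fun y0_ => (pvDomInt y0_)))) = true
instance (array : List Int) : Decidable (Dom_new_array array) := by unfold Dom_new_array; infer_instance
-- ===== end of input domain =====

-- B replaces A's nested per-index rescans by one right-to-left monotonic-stack pass
-- (the stack at each position is the greedy record chain starting there); return value only.

-- ===== PORT A =====
-- literal port of A: outer index loop, inner scan of the suffix keeping (new_list_2, number)
def new_array (array : List Int) : List (List Int) :=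
  (PySem.List.pyRange 0 array.length 1).foldl (fun new_list_1 i =>
    let x := PySem.List.pyGetD array i 0
    let p := (PySem.List.pyRange (i+1) array.length 1).foldl
        (fun (st : List Int × Int) j =>
          let y := PySem.List.pyGetD array j 0
          if y > st.2 then (st.1 ++ [y], y) else st) ([x], x)
    if p.1.length > 1 then new_list_1 ++ [p.1] else new_list_1) []

-- ===== PORT B =====
-- literal port of B: fold over the reversed list; the Python stack keeps its top at
-- index 0, so it is the Lean list head; the pop-while loop is dropWhile, append+reverse
-- of `out` is concat+reverse.
def new_array_alt (array : List Int) : List (List Int) :=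
  let p := array.reverse.foldl
    (fun (st : List Int × List (List Int)) x =>
      let stack := x :: st.1.dropWhile (fun y => y ≤ x)
      (stack, if stack.length > 1 then st.2.concat stack else st.2)) ([], [])
  p.2.reverse

-- ===== PRECONDITION & SPEC =====
def Spec_new_array (array : List Int) (out : List (List Int)) : Prop := out = new_array_alt array
instance (array : List Int) (out : List (List Int)) : Decidable (Spec_new_array array out) := by unfold Spec_new_array; infer_instance

-- ===== CLAIM (what is proved, stated in full; the proofs are below) =====
def Claim_equal_new_array : Prop := ∀ (array : List Int), Dom_new_array array → Spec_new_array array (new_array array)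

-- ===== LEMMAS AND PROOFS =====

-- greedy record scan of a suffix with current record m (the common specification)
def scanA (m : Int) : List Int → List Int
  | [] => []
  | y :: ys => if m < y then y :: scanA y ys else scanA m ys

-- final record after the scan
def lastA (m : Int) : List Int → Int
  | [] => m
  | y :: ys => if m < y then lastA y ys else lastA m ys

-- reference result, structurally on the list
def outA : List Int → List (List Int)
  | [] => []
  | x :: xs => (if (x :: scanA x xs).length > 1 then [x :: scanA x xs] else []) ++ outA xs

theorem foldl_scanA (ys : List Int) : ∀ (pre : List Int) (m : Int),
    ys.foldl (fun (st : List Int × Int) y => if y > st.2 then (st.1 ++ [y], y) else st) (pre, m)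
      = (pre ++ scanA m ys, lastA m ys) := by
  induction ys with
  | nil => intro pre m; simp [scanA, lastA]
  | cons y ys ih =>
    intro pre m
    by_cases h : m < y
    · simp only [List.foldl_cons, scanA, lastA, if_pos h, gt_iff_lt, ih, List.append_assoc,
        List.singleton_append]
    · simp only [List.foldl_cons, scanA, lastA, if_neg h, gt_iff_lt, ih]

theorem outer_loop (xs : List Int) : ∀ acc : List (List Int),
    (List.range xs.length).foldl (fun nl1 (k : Nat) =>
        if ((PySem.List.pyGetD xs (k : Int) 0) ::
            scanA (PySem.List.pyGetD xs (k : Int) 0) (xs.drop (k+1))).length > 1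
        then nl1 ++ [(PySem.List.pyGetD xs (k : Int) 0) ::
            scanA (PySem.List.pyGetD xs (k : Int) 0) (xs.drop (k+1))]
        else nl1) acc
      = acc ++ outA xs := by
  induction xs with
  | nil => intro acc; simp [outA]
  | cons x t ih =>
    intro acc
    rw [List.length_cons, List.range_succ_eq_map, List.foldl_cons, List.foldl_map]
    have hfun : (fun (nl1 : List (List Int)) (k : Nat) =>
        if ((PySem.List.pyGetD (x :: t) ((k.succ : Nat) : Int) 0) ::
            scanA (PySem.List.pyGetD (x :: t) ((k.succ : Nat) : Int) 0) ((x :: t).drop (k.succ+1))).length > 1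
        then nl1 ++ [(PySem.List.pyGetD (x :: t) ((k.succ : Nat) : Int) 0) ::
            scanA (PySem.List.pyGetD (x :: t) ((k.succ : Nat) : Int) 0) ((x :: t).drop (k.succ+1))]
        else nl1)
      = (fun (nl1 : List (List Int)) (k : Nat) =>
        if ((PySem.List.pyGetD t (k : Int) 0) ::
            scanA (PySem.List.pyGetD t (k : Int) 0) (t.drop (k+1))).length > 1
        then nl1 ++ [(PySem.List.pyGetD t (k : Int) 0) ::
            scanA (PySem.List.pyGetD t (k : Int) 0) (t.drop (k+1))]
        else nl1) := by
      funext nl1 k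
      rw [show ((k.succ : Nat) : Int) = (((k+1 : Nat)) : Int) from rfl,
        PySem.List.pyGetD_natCast, PySem.List.pyGetD_natCast,
        show k.succ + 1 = (k+1) + 1 from rfl, List.drop_succ_cons]
      simp [List.getD]
    rw [hfun, ih]
    have h0 : PySem.List.pyGetD (x :: t) ((0 : Nat) : Int) 0 = x := by
      rw [PySem.List.pyGetD_natCast]; rfl
    simp only [h0, Nat.zero_add, List.drop_succ_cons, List.drop_zero, outA]
    split_ifs <;> simp

theorem new_array_eq_outA (array : List Int) : new_array array = outA array := by
  unfold new_array
  have hb : ∀ (i : Int), 0 ≤ i → ∀ x : Int,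
      (PySem.List.pyRange (i+1) array.length 1).foldl
        (fun (st : List Int × Int) j =>
          let y := PySem.List.pyGetD array j 0
          if y > st.2 then (st.1 ++ [y], y) else st) ([x], x)
      = ([x] ++ scanA x (array.drop (i+1).toNat), lastA x (array.drop (i+1).toNat)) := by
    intro i hi x
    rw [PySem.List.foldl_pyRange_pyGetD' array 0
      (fun (st : List Int × Int) y => if y > st.2 then (st.1 ++ [y], y) else st) ([x], x)
      (by omega), foldl_scanA]
  rw [PySem.List.pyRange_zero_nat, List.foldl_map]
  have hfun : (fun (nl1 : List (List Int)) (k : Nat) =>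
      let x := PySem.List.pyGetD array (k : Int) 0
      let p := (PySem.List.pyRange ((k : Int)+1) array.length 1).foldl
          (fun (st : List Int × Int) j =>
            let y := PySem.List.pyGetD array j 0
            if y > st.2 then (st.1 ++ [y], y) else st) ([x], x)
      if p.1.length > 1 then nl1 ++ [p.1] else nl1)
    = (fun (nl1 : List (List Int)) (k : Nat) =>
      if ((PySem.List.pyGetD array (k : Int) 0) ::
          scanA (PySem.List.pyGetD array (k : Int) 0) (array.drop (k+1))).length > 1
      then nl1 ++ [(PySem.List.pyGetD array (k : Int) 0) ::
          scanA (PySem.List.pyGetD array (k : Int) 0) (array.drop (k+1))]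
      else nl1) := by
    funext nl1 k
    simp only [hb (k : Int) (by positivity)]
    norm_num
  rw [hfun, outer_loop]
  simp

theorem dropWhile_scanA (ys : List Int) : ∀ x y : Int, y ≤ x →
    (scanA y ys).dropWhile (fun z => z ≤ x) = scanA x ys := by
  induction ys with
  | nil => intro x y _; simp [scanA]
  | cons z zs ih =>
    intro x y hyx
    by_cases h1 : y < z
    · by_cases h2 : x < z
      · rw [scanA, if_pos h1, scanA, if_pos h2,
          List.dropWhile_cons_of_neg (by simpa using (by omega : ¬ z ≤ x))]
      · rw [scanA, if_pos h1, scanA, if_neg h2,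
          List.dropWhile_cons_of_pos (by simpa using (by omega : z ≤ x)), ih x z (by omega)]
    · have h2 : ¬ x < z := by omega
      rw [scanA, if_neg h1, scanA, if_neg h2, ih x y hyx]

-- the stack is the chain; the accumulated output is outA reversed
theorem recB_spec (xs : List Int) :
    xs.foldr (fun x (st : List Int × List (List Int)) =>
        let stack := x :: st.1.dropWhile (fun y => y ≤ x)
        (stack, if stack.length > 1 then st.2.concat stack else st.2)) ([], [])
      = ((match xs with | [] => [] | x :: t => x :: scanA x t), (outA xs).reverse) := by
  induction xs with
  | nil => simp [outA]
  | cons x t ih =>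
    rw [List.foldr_cons, ih]
    cases t with
    | nil => simp [scanA, outA]
    | cons z zs =>
      by_cases h : z ≤ x
      · have h2 : ¬ x < z := by omega
        simp only [List.dropWhile_cons, decide_eq_true_eq, if_pos h, dropWhile_scanA zs x z h,
          scanA, if_neg h2, outA]
        split_ifs with hc <;>
          simp_all [outA, List.concat_eq_append, apply_ite List.reverse]
      · have h2 : x < z := by omega
        simp only [List.dropWhile_cons, decide_eq_true_eq, if_neg h, scanA, if_pos h2, outA]
        split_ifs with hc <;>
          simp_all [outA, List.concat_eq_append, apply_ite List.reverse]

theorem new_array_alt_eq_outA (array : List Int) : new_array_alt array = outA array := by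
  unfold new_array_alt
  rw [List.foldl_reverse]
  simp only [recB_spec]
  simp

-- ===== VERDICT (by name: the statement is the Claim_ definition above) =====
theorem new_array_spec : Claim_equal_new_array := by
  intro array _
  unfold Spec_new_array
  rw [new_array_eq_outA, new_array_alt_eq_outA]
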